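-- pv_equiv track=rewrite | github.com/karishmatank/ls-core | py-110/other_practice/find_vowel_substrings.py | find_vowel_substrings
-- ===== SOURCE A (Python) =====
-- VOWELS = 'aeiou'
--
-- def check_substring_validity(substr):
--     return (substr[0] in VOWELS) and (substr[-1] in VOWELS)
--
-- def find_vowel_substrings(string):
--     string = string.lower()
--     substrings = []
--     for idx_start in range(0, len(string)):
--         for idx_end in range(idx_start + 1, len(string) + 1):
--             substring = string[idx_start:idx_end]
--             if check_substring_validity(substring):
--                 substrings.append(substring)
--     substrings.sort(key=len, reverse=True)
--     return substrings
-- ===== SOURCE B (Python) =====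
-- VOWELS = 'aeiou'
--
-- def find_vowel_substrings(string):
--     s = string.lower()
--     pos = [i for i, c in enumerate(s) if c in VOWELS]
--     subs = [s[p:q + 1] for p in pos for q in pos if q >= p]
--     subs.sort(key=len, reverse=True)
--     return subs
-- ===== Notes on version B (the rewrite author's own statement) =====
-- stated objective: alternative
-- what changed: B first builds an index of vowel positions in one enumerate pass and then generates substrings only from pairs of vowel positions, instead of A's scan over every start/end pair that slices each candidate and tests its endpoints.
import Mathlib
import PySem

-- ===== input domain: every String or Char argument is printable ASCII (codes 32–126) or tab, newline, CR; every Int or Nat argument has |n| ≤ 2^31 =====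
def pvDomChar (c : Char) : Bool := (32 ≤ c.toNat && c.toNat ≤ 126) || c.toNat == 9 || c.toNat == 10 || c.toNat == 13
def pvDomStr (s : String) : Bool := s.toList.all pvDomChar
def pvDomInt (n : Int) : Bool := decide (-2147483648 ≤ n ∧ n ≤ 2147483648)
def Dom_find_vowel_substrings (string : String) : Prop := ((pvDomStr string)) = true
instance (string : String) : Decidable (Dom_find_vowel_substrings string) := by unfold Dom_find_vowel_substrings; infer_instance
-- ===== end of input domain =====

-- B replaces A's scan over all start/end index pairs (slicing and endpoint-testing each substring)
-- by an index of the vowel positions built in one pass, then enumerates vowel-position pairs only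
-- (objective: alternative traversal; same insertion order, so the same stably-sorted output).

-- ===== PORT A =====
def VOWELS : List Char := "aeiou".toList

-- substr[0] / substr[-1]: substr is nonempty at every call site, so pyGetD's default is never read
def check_substring_validity (substr : List Char) : Bool :=
  PySem.Chars.isIn [PySem.List.pyGetD substr 0 ' '] VOWELS
  && PySem.Chars.isIn [PySem.List.pyGetD substr (-1) ' '] VOWELS

def find_vowel_substrings (string : String) : List String :=
  let s := (PySem.Str.lower string).toList
  let substrings : List (List Char) :=
    (PySem.List.pyRange 0 (PySem.List.len s) 1).foldl (fun acc idx_start =>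
      (PySem.List.pyRange (idx_start + 1) (PySem.List.len s + 1) 1).foldl (fun acc idx_end =>
        let substring := PySem.List.slice s (some idx_start) (some idx_end)
        if check_substring_validity substring then acc ++ [substring] else acc) acc) []
  (PySem.List.sorted substrings List.length true).map String.ofList

-- ===== PORT B =====
def find_vowel_substrings_alt (string : String) : List String :=
  let s := (PySem.Str.lower string).toList
  let pos : List Int :=
    ((PySem.List.enumerate s).filter (fun ic => PySem.Chars.isIn [ic.2] VOWELS)).map (·.1)
  let subs : List (List Char) :=
    pos.flatMap (fun p =>
      (pos.filter (fun q => p ≤ q)).map (fun q => PySem.List.slice s (some p) (some (q + 1))))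
  (PySem.List.sorted subs List.length true).map String.ofList

-- ===== PRECONDITION & SPEC =====
def Spec_find_vowel_substrings (string : String) (out : List String) : Prop := out = find_vowel_substrings_alt string
instance (string : String) (out : List String) : Decidable (Spec_find_vowel_substrings string out) := by unfold Spec_find_vowel_substrings; infer_instance

-- ===== CLAIM (what is proved, stated in full; the proofs are below) =====
def Claim_equal_find_vowel_substrings : Prop := ∀ (string : String), Dom_find_vowel_substrings string → Spec_find_vowel_substrings string (find_vowel_substrings string)

-- ===== LEMMAS AND PROOFS =====

-- whether position k of s holds a vowel (the default is never read at in-range k)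
def vowelAt (s : List Char) (k : Nat) : Bool := PySem.Chars.isIn [s.getD k ' '] VOWELS

-- the common normal form of both pre-sort substring lists
def canonSubs (s : List Char) : List (List Char) :=
  (List.range s.length).flatMap (fun p =>
    if vowelAt s p then
      ((List.range (s.length - p)).filter (fun t => vowelAt s (p + t))).map
        (fun t => (s.drop p).take (t + 1))
    else [])

lemma check_slice (s : List Char) (k t : Nat) (hk : k < s.length) (ht : t < s.length - k) :
    check_substring_validity ((s.drop k).take (t + 1)) = (vowelAt s k && vowelAt s (k + t)) := by
  have hlen : ((s.drop k).take (t + 1)).length = t + 1 := by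
    simp [List.length_take, List.length_drop]; omega
  have hne : ((s.drop k).take (t + 1)) ≠ [] := by
    intro h; rw [h] at hlen; simp at hlen
  unfold check_substring_validity vowelAt
  rw [PySem.List.pyGetD_zero, PySem.List.pyGetD_neg_one _ _ hne]
  have h0 : ((s.drop k).take (t + 1)).getD 0 ' ' = s.getD k ' ' := by
    simp [List.getD_eq_getElem?_getD, List.getElem?_drop]
  have h1 : ((s.drop k).take (t + 1)).getLast hne = s.getD (k + t) ' ' := by
    rw [List.getLast_eq_getElem]
    simp [hlen, List.getElem_take, List.getElem_drop,
      List.getElem?_eq_getElem (show k + t < s.length by omega)]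
  rw [h0, h1]

lemma pyRange_cast_add (n : Nat) : ∀ (a : Nat),
    PySem.List.pyRange (a : Int) ((a + n : Nat) : Int) = (List.range' a n).map (fun t : Nat => (t : Int)) := by
  induction n with
  | zero => intro a; simp [PySem.List.pyRange]
  | succ m ih =>
    intro a
    rw [PySem.List.pyRange_one_cons (by push_cast; omega), List.range'_succ]
    rw [show ((a : Int) + 1) = ((a + 1 : Nat) : Int) by push_cast; ring]
    rw [show ((a + (m + 1) : Nat) : Int) = (((a + 1) + m : Nat) : Int) by push_cast; ring]
    rw [ih (a + 1)]
    simp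

lemma pyRange_cast (a b : Nat) :
    PySem.List.pyRange (a : Int) (b : Int) = (List.range' a (b - a)).map (fun t : Nat => (t : Int)) := by
  rcases Nat.le_total a b with h | h
  · conv_lhs => rw [show (b : Int) = ((a + (b - a) : Nat) : Int) by push_cast; omega]
    rw [pyRange_cast_add]
  · rw [show b - a = 0 from by omega]
    simp [pysem, show (b : Int) ≤ (a : Int) from by exact_mod_cast h]

lemma A_inner (s : List Char) (k : Nat) (hk : k < s.length) :
    ((PySem.List.pyRange ((k : Int) + 1) ((s.length : Int) + 1)).filter
        (fun e => check_substring_validity (PySem.List.slice s (some (k : Int)) (some e)))).map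
      (fun e => PySem.List.slice s (some (k : Int)) (some e))
    = (if vowelAt s k then
        ((List.range (s.length - k)).filter (fun t => vowelAt s (k + t))).map
          (fun t => (s.drop k).take (t + 1))
      else []) := by
  rw [show ((k : Int) + 1) = ((k + 1 : Nat) : Int) by push_cast; ring,
      show ((s.length : Int) + 1) = ((s.length + 1 : Nat) : Int) by push_cast; ring,
      pyRange_cast, List.range'_eq_map_range]
  rw [show s.length + 1 - (k + 1) = s.length - k from by omega]
  simp only [List.map_map, List.filter_map]
  have hcongr : ∀ t ∈ List.range (s.length - k),
      check_substring_validity (PySem.List.slice s (some (k : Int)) (some (((k + 1) + t : Nat) : Int)))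
        = (vowelAt s k && vowelAt s (k + t)) := by
    intro t htm
    rw [List.mem_range] at htm
    rw [PySem.List.slice_natCast, show (k + 1 + t) - k = t + 1 from by omega]
    exact check_slice s k t hk htm
  rw [List.filter_congr (by intro t htm; simpa using hcongr t htm)]
  by_cases hv : vowelAt s k
  · simp only [hv, if_true]
    apply List.map_congr_left
    intro t htm
    rw [List.mem_filter, List.mem_range] at htm
    simp only [Function.comp]
    rw [PySem.List.slice_natCast, show (k + 1 + t) - k = t + 1 from by omega]
  · simp [hv]

lemma A_side (s : List Char) :
    ((PySem.List.pyRange 0 (PySem.List.len s) 1).foldl (fun acc idx_start =>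
      (PySem.List.pyRange (idx_start + 1) (PySem.List.len s + 1) 1).foldl (fun acc idx_end =>
        let substring := PySem.List.slice s (some idx_start) (some idx_end)
        if check_substring_validity substring then acc ++ [substring] else acc) acc)
      ([] : List (List Char))) = canonSubs s := by
  simp only [PySem.List.foldl_append_if, PySem.List.foldl_append_eq_flatMap,
    PySem.List.len_eq, PySem.List.pyRange_zero_natCast, List.flatMap_map, List.nil_append]
  unfold canonSubs
  apply List.flatMap_congr
  intro k hkm
  rw [List.mem_range] at hkm
  exact A_inner s k hkm

lemma flatMap_filter_eq {α β : Type} (p : α → Bool) (f : α → List β) (l : List α) :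
    (l.filter p).flatMap f = l.flatMap (fun x => if p x then f x else []) := by
  induction l with
  | nil => rfl
  | cons a t ih => by_cases h : p a <;> simp [h, ih]

lemma filter_le_range (n p : Nat) :
    (List.range n).filter (fun q => p ≤ q) = List.range' p (n - p) := by
  rcases Nat.le_total n p with h | h
  · rw [show n - p = 0 from by omega]
    simp only [List.range'_zero]
    rw [List.filter_eq_nil_iff]
    intro q hq
    rw [List.mem_range] at hq
    simp; omega
  · rw [List.range_eq_range', show n = p + (n - p) from by omega,
        ← List.range'_append (s := 0) (m := p) (n := n - p) (step := 1)]
    rw [List.filter_append]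
    rw [List.filter_eq_nil_iff.mpr (by intro q hq; rw [List.mem_range'] at hq; simp; omega)]
    rw [List.filter_eq_self.mpr (by intro q hq; rw [List.mem_range'] at hq; simp; omega)]
    simp

lemma pos_eq (s : List Char) :
    ((PySem.List.enumerate s).filter (fun ic => PySem.Chars.isIn [ic.2] VOWELS)).map (·.1)
    = ((List.range s.length).filter (vowelAt s)).map (fun k : Nat => (k : Int)) := by
  rw [PySem.List.enumerate_eq_map_pyRange s ' ']
  simp only [PySem.List.len_eq, PySem.List.pyRange_zero_natCast, List.map_map,
    List.filter_map, List.map_map, Function.comp_def, PySem.List.pyGetD_natCast]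
  rfl

lemma B_inner (s : List Char) (p : Nat) :
    ((((List.range s.length).filter (vowelAt s)).map (fun k : Nat => (k : Int))).filter
        (fun q => (p : Int) ≤ q)).map (fun q => PySem.List.slice s (some (p : Int)) (some (q + 1)))
    = ((List.range (s.length - p)).filter (fun t => vowelAt s (p + t))).map
        (fun t => (s.drop p).take (t + 1)) := by
  rw [List.filter_map, List.map_map]
  rw [List.filter_congr (q := fun q : Nat => decide (p ≤ q)) (by intro q _; simp)]
  rw [List.filter_comm, filter_le_range, List.range'_eq_map_range, List.filter_map, List.map_map]
  apply List.map_congr_left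
  intro t _
  simp only [Function.comp]
  rw [show ((p + t : Nat) : Int) + 1 = ((p + t + 1 : Nat) : Int) by push_cast; ring,
      PySem.List.slice_natCast, show p + t + 1 - p = t + 1 from by omega]

lemma B_side (s : List Char) :
    ((((PySem.List.enumerate s).filter (fun ic => PySem.Chars.isIn [ic.2] VOWELS)).map (·.1)).flatMap (fun p =>
      ((((PySem.List.enumerate s).filter (fun ic => PySem.Chars.isIn [ic.2] VOWELS)).map (·.1)).filter (fun q => p ≤ q)).map
        (fun q => PySem.List.slice s (some p) (some (q + 1))))) = canonSubs s := by
  rw [pos_eq, List.flatMap_map, flatMap_filter_eq]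
  unfold canonSubs
  apply List.flatMap_congr
  intro p hp
  by_cases hv : vowelAt s p
  · simp only [hv, if_true]
    exact B_inner s p
  · simp [hv]

-- ===== VERDICT (by name: the statement is the Claim_ definition above) =====
theorem find_vowel_substrings_spec : Claim_equal_find_vowel_substrings := by
  intro string _
  unfold Spec_find_vowel_substrings find_vowel_substrings find_vowel_substrings_alt
  simp only [A_side, B_side]
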